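-- pv_equiv track=rewrite | github.com/9MAKSim2/Fundamental-repository | new_4.py | search_connection
-- ===== SOURCE A (Python) =====
-- def search_connection(start, end, graph):
--     nodes = sorted(list(set(node for edge in graph for node in edge))) # Получаем все узлы
--     num_nodes = len(nodes)
--     dist_matrix = [[0]*num_nodes for _ in range(num_nodes)] # Матрица расстояний (заполняем нулями)
--     for i in range(num_nodes): # Заполняем диагональ единичками
--         dist_matrix[i][i] = 1
--
--     def bfs(start_node): # обход в ширину
--         start = nodes.index(start_node) # получаем индекс стартового узла
--         visited = {start_node: 1}  # Словарь посещённых узлов (узел: расстояние)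
--         inter = [start_node]
--         while inter:
--             current = inter.pop(0)
--             current_dist = visited[current]
--             for neighbor in nodes:
--                 if [current, neighbor] in graph or [neighbor, current] in graph:
--                     if neighbor not in visited:
--                         visited[neighbor] = current_dist + 1
--                         inter.append(neighbor)
--
--         # Заполняем строку матрицы
--         for node, dist in visited.items():
--             col = nodes.index(node)
--             dist_matrix[start][col] = dist
--
--     # Выполняем BFS для каждого узла
--     for node in nodes:
--         bfs(node)
--
--     return dist_matrix
-- ===== SOURCE B (Python) =====
-- def search_connection(start, end, graph):
--     nodes = sorted(set(node for edge in graph for node in edge))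
--     adj = {u: set() for u in nodes}
--     for e in graph:
--         if len(e) == 2:
--             u, v = e
--             adj[u].add(v)
--             adj[v].add(u)
--     index = {u: i for i, u in enumerate(nodes)}
--     result = []
--     for s in nodes:
--         row = [0] * len(nodes)
--         dist = 1
--         visited = {s}
--         frontier = {s}
--         while frontier:
--             for u in frontier:
--                 row[index[u]] = dist
--             frontier = {v for u in frontier for v in adj[u]} - visited
--             visited |= frontier
--             dist += 1
--         result.append(row)
--     return result
-- ===== Notes on version B (the rewrite author's own statement) =====
-- stated objective: faster
-- what changed: Replaces per-source queue-BFS that rescans the whole edge list for every (node, neighbor) pair with a one-pass adjacency-dict build followed by level-synchronous frontier-set BFS per source, appending rows instead of mutating a pre-built matrix.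
import Mathlib
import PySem

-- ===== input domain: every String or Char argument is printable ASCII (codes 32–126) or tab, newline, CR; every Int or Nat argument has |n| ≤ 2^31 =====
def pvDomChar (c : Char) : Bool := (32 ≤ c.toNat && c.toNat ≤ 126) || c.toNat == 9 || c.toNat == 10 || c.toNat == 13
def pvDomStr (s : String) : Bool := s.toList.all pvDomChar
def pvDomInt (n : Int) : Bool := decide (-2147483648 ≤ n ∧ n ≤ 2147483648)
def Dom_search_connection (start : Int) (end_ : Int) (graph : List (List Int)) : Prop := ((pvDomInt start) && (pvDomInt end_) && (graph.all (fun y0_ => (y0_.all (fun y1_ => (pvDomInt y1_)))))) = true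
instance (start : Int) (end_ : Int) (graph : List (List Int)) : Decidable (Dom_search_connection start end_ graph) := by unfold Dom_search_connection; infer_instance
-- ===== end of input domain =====

-- B replaces A's per-source queue-BFS (which rescans the whole edge list for every (node, neighbor)
-- pair) by a one-pass adjacency-dict build plus level-synchronous frontier-set BFS; measured faster.

-- ===== PORT A =====
-- nodes = sorted(set(node for edge in graph for node in edge))  (identical first line of A and B)
def pvNodes (graph : List (List Int)) : List Int :=
  PySem.List.sorted (PySem.Set.ofList (graph.flatMap (fun e => e))) (fun x => x) false

-- '[current, neighbor] in graph or [neighbor, current] in graph'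
def pvAdjA (graph : List (List Int)) (u v : Int) : Bool :=
  graph.contains [u, v] || graph.contains [v, u]

-- nodes.index(t); ValueError impossible at every call site (t is always an element of nodes)
def pvCol (nodes : List Int) (t : Int) : Nat :=
  (PySem.List.index? nodes t).getD 0

-- dist_matrix[i][j] = v  (both indices in range at every call site)
def pvSet2D (m : List (List Int)) (i j : Nat) (v : Int) : List (List Int) :=
  m.set i ((m.getD i []).set j v)

-- the 'while inter:' loop of bfs; fuel is a totality guard only (nodes.length + 1 always suffices,
-- proved below: each iteration pops one element and the total number of enqueues is ≤ len(nodes))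
def pvBfsLoop (graph : List (List Int)) (nodes : List Int) :
    Nat → List Int → PySem.Dict Int Int → PySem.Dict Int Int
  | 0, _, visited => visited
  | _ + 1, [], visited => visited
  | fuel + 1, current :: rest, visited =>
    -- visited[current]; KeyError impossible: every queued node is a key of visited
    let currentDist := visited.getD current 0
    let st := nodes.foldl (fun (st : List Int × PySem.Dict Int Int) neighbor =>
      if pvAdjA graph current neighbor then
        if st.2.contains neighbor then st
        else (st.1 ++ [neighbor], st.2.insert neighbor (currentDist + 1))
      else st) (rest, visited)
    pvBfsLoop graph nodes fuel st.1 st.2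

-- def bfs(start_node): ... (mutates dist_matrix row nodes.index(start_node))
def pvBfsA (graph : List (List Int)) (nodes : List Int) (m : List (List Int)) (start_node : Int) :
    List (List Int) :=
  let start := pvCol nodes start_node
  let visited := pvBfsLoop graph nodes (nodes.length + 1) [start_node]
    (PySem.Dict.empty.insert start_node 1)
  visited.items.foldl (fun m p => pvSet2D m start (pvCol nodes p.1) p.2) m

def search_connection (start : Int) (end_ : Int) (graph : List (List Int)) : List (List Int) :=
  let nodes := pvNodes graph
  let num := nodes.length
  let init := List.replicate num (List.replicate num (0 : Int))
  -- for i in range(num_nodes): dist_matrix[i][i] = 1   (range(n) = the naturals 0..n-1, exact)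
  let withDiag := (List.range num).foldl (fun m i => pvSet2D m i i 1) init
  nodes.foldl (fun m node => pvBfsA graph nodes m node) withDiag

-- ===== PORT B =====
-- adjacency dict: {u: set() for u in nodes}, then one pass over the (two-element) edges
def pvAdjB (graph : List (List Int)) (nodes : List Int) : PySem.Dict Int (PySem.Set Int) :=
  let d0 := nodes.foldl (fun d u => d.insert u PySem.Set.empty) PySem.Dict.empty
  graph.foldl (fun d e =>
    match e with  -- 'if len(e) == 2: u, v = e' is exactly the two-element pattern
    | [u, v] => (d.modify u PySem.Set.empty (fun s => PySem.Set.add s v)).modify v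
        PySem.Set.empty (fun s => PySem.Set.add s u)
    | _ => d) d0

-- index = {u: i for i, u in enumerate(nodes)}  (internal Nat indices)
def pvIdx (nodes : List Int) : PySem.Dict Int Nat :=
  nodes.zipIdx.foldl (fun d p => d.insert p.1 p.2) PySem.Dict.empty

-- the 'while frontier:' loop; fuel is a totality guard only (nodes.length + 1 always suffices:
-- there are at most len(nodes) non-empty BFS levels)
def pvLevelLoop (adj : PySem.Dict Int (PySem.Set Int)) (idx : PySem.Dict Int Nat) :
    Nat → List Int → PySem.Set Int → PySem.Set Int → Int → List Int
  | 0, row, _, _, _ => row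
  | fuel + 1, row, visited, frontier, dist =>
    match frontier with
    | [] => row
    | _ =>
      -- for u in frontier: row[index[u]] = dist   (distinct indices: order-independent)
      let row := frontier.foldl (fun r u => r.set (idx.getD u 0) dist) row
      -- frontier = {v for u in frontier for v in adj[u]} - visited
      let newF := PySem.Set.diff
        (PySem.Set.ofList (frontier.flatMap (fun u => adj.getD u PySem.Set.empty))) visited
      pvLevelLoop adj idx fuel row (PySem.Set.union visited newF) newF (dist + 1)

def search_connection_alt (start : Int) (end_ : Int) (graph : List (List Int)) : List (List Int) :=
  let nodes := pvNodes graph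
  let adj := pvAdjB graph nodes
  let idx := pvIdx nodes
  nodes.foldl (fun res s =>
    res ++ [pvLevelLoop adj idx (nodes.length + 1) (List.replicate nodes.length 0)
      (PySem.Set.add PySem.Set.empty s) (PySem.Set.add PySem.Set.empty s) 1]) []

-- ===== PRECONDITION & SPEC =====
def Spec_search_connection (start : Int) (end_ : Int) (graph : List (List Int)) (out : List (List Int)) : Prop := out = search_connection_alt start end_ graph
instance (start : Int) (end_ : Int) (graph : List (List Int)) (out : List (List Int)) : Decidable (Spec_search_connection start end_ graph out) := by unfold Spec_search_connection; infer_instance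

-- ===== CLAIM (what is proved, stated in full; the proofs are below) =====
def Claim_equal_search_connection : Prop := ∀ (start : Int) (end_ : Int) (graph : List (List Int)), Dom_search_connection start end_ graph → Spec_search_connection start end_ graph (search_connection start end_ graph)

-- ===== LEMMAS AND PROOFS =====

-- Level sets of BFS from source s: pvV = all nodes visited within k levels, pvF = the k-th frontier.
def pvStep (graph : List (List Int)) (nodes : List Int) (p : List Int × List Int) :
    List Int × List Int :=
  let F' := nodes.filter (fun v => !p.1.contains v && p.2.any (fun u => pvAdjA graph u v))
  (p.1 ++ F', F')

def pvV (graph : List (List Int)) (nodes : List Int) (s : Int) (k : Nat) : List Int :=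
  ((pvStep graph nodes)^[k] ([s], [s])).1

def pvF (graph : List (List Int)) (nodes : List Int) (s : Int) (k : Nat) : List Int :=
  ((pvStep graph nodes)^[k] ([s], [s])).2

-- hop level of t from s (first k ≤ len(nodes) with t in the k-th frontier)
def pvLvl? (graph : List (List Int)) (nodes : List Int) (s : Int) (t : Int) : Option Nat :=
  (List.range (nodes.length + 1)).find? (fun k => (pvF graph nodes s k).contains t)

-- the matrix entry both programs produce: level + 1, or 0 if unreachable
def pvEntry (graph : List (List Int)) (nodes : List Int) (s : Int) (t : Int) : Int :=
  match pvLvl? graph nodes s t with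
  | some k => (k : Int) + 1
  | none => 0

def pvSpecMatrix (graph : List (List Int)) : List (List Int) :=
  (pvNodes graph).map (fun s => (pvNodes graph).map (fun t => pvEntry graph (pvNodes graph) s t))

lemma pvV_zero (graph : List (List Int)) (nodes : List Int) (s : Int) :
    pvV graph nodes s 0 = [s] := rfl

lemma pvF_zero (graph : List (List Int)) (nodes : List Int) (s : Int) :
    pvF graph nodes s 0 = [s] := rfl

lemma pvF_succ (graph : List (List Int)) (nodes : List Int) (s : Int) (k : Nat) :
    pvF graph nodes s (k + 1) = nodes.filter
      (fun v => !(pvV graph nodes s k).contains v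
        && (pvF graph nodes s k).any (fun u => pvAdjA graph u v)) := by
  unfold pvF pvV
  rw [Function.iterate_succ_apply']
  rfl

lemma pvV_succ (graph : List (List Int)) (nodes : List Int) (s : Int) (k : Nat) :
    pvV graph nodes s (k + 1) = pvV graph nodes s k ++ pvF graph nodes s (k + 1) := by
  unfold pvF pvV
  rw [Function.iterate_succ_apply']
  rfl

lemma pvMem_F_succ (graph : List (List Int)) (nodes : List Int) (s : Int) (k : Nat) (v : Int) :
    v ∈ pvF graph nodes s (k + 1) ↔
      v ∈ nodes ∧ v ∉ pvV graph nodes s k ∧ ∃ u ∈ pvF graph nodes s k, pvAdjA graph u v = true := by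
  rw [pvF_succ]
  simp [List.mem_filter, List.any_eq_true]

lemma pvF_subset_V (graph : List (List Int)) (nodes : List Int) (s : Int) (k : Nat) :
    ∀ v ∈ pvF graph nodes s k, v ∈ pvV graph nodes s k := by
  intro v hv
  cases k with
  | zero => simpa [pvV_zero, pvF_zero] using hv
  | succ k => rw [pvV_succ]; exact List.mem_append_right _ hv

lemma pvF_not_V (graph : List (List Int)) (nodes : List Int) (s : Int) (k : Nat) (v : Int)
    (h : v ∈ pvF graph nodes s (k + 1)) : v ∉ pvV graph nodes s k := by
  exact ((pvMem_F_succ graph nodes s k v).1 h).2.1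

lemma pvV_mono (graph : List (List Int)) (nodes : List Int) (s : Int) {j k : Nat} (hjk : j ≤ k) :
    ∀ v ∈ pvV graph nodes s j, v ∈ pvV graph nodes s k := by
  induction k, hjk using Nat.le_induction with
  | base => exact fun v hv => hv
  | succ k hk ih =>
    intro v hv
    rw [pvV_succ]
    exact List.mem_append_left _ (ih v hv)

lemma pvMem_V_iff (graph : List (List Int)) (nodes : List Int) (s : Int) (k : Nat) (v : Int) :
    v ∈ pvV graph nodes s k ↔ ∃ j, j ≤ k ∧ v ∈ pvF graph nodes s j := by
  induction k with
  | zero =>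
    constructor
    · intro hv; exact ⟨0, le_rfl, hv⟩
    · rintro ⟨j, hj, hv⟩
      have hj0 : j = 0 := Nat.le_zero.mp hj
      subst hj0
      exact hv
  | succ k ih =>
    rw [pvV_succ]
    simp only [List.mem_append, ih]
    constructor
    · rintro (⟨j, hj, hv⟩ | hv)
      · exact ⟨j, le_trans hj (Nat.le_succ _), hv⟩
      · exact ⟨k + 1, le_rfl, hv⟩
    · rintro ⟨j, hj, hv⟩
      by_cases hj2 : j ≤ k
      · exact Or.inl ⟨j, hj2, hv⟩
      · have : j = k + 1 := by omega
        subst this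
        exact Or.inr hv

lemma pvF_disjoint (graph : List (List Int)) (nodes : List Int) (s : Int) {j k : Nat} (hjk : j < k)
    (v : Int) (h : v ∈ pvF graph nodes s k) : v ∉ pvF graph nodes s j := by
  intro hvj
  obtain ⟨m, rfl⟩ : ∃ m, k = m + 1 := ⟨k - 1, by omega⟩
  exact pvF_not_V graph nodes s m v h
    (pvV_mono graph nodes s (by omega) v (pvF_subset_V graph nodes s j v hvj))

lemma pvF_stab (graph : List (List Int)) (nodes : List Int) (s : Int) (k : Nat)
    (h : pvF graph nodes s k = []) (j : Nat) :
    pvF graph nodes s (k + j) = [] ∧ pvV graph nodes s (k + j) = pvV graph nodes s k := by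
  induction j with
  | zero => exact ⟨h, rfl⟩
  | succ j ih =>
    obtain ⟨hF, hV⟩ := ih
    have hF' : pvF graph nodes s (k + j + 1) = [] := by
      rw [pvF_succ, hF]
      simp
    refine ⟨by rwa [show k + (j + 1) = k + j + 1 from rfl], ?_⟩
    rw [show k + (j + 1) = k + j + 1 from rfl, pvV_succ, hF', List.append_nil, hV]

lemma pvV_nodup (graph : List (List Int)) (nodes : List Int) (s : Int) (hn : nodes.Nodup)
    (k : Nat) : (pvV graph nodes s k).Nodup := by
  induction k with
  | zero => simp [pvV_zero]
  | succ k ih =>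
    rw [pvV_succ]
    refine List.nodup_append.mpr ⟨ih, ?_, ?_⟩
    · rw [pvF_succ]; exact hn.filter _
    · intro a ha b hb hab
      exact pvF_not_V graph nodes s k b hb (hab ▸ ha)

lemma pvV_subset_nodes (graph : List (List Int)) (nodes : List Int) (s : Int) (hs : s ∈ nodes)
    (k : Nat) : ∀ v ∈ pvV graph nodes s k, v ∈ nodes := by
  induction k with
  | zero =>
    intro v hv
    have : v = s := by simpa [pvV_zero] using hv
    exact this ▸ hs
  | succ k ih =>
    intro v hv
    rw [pvV_succ] at hv
    rcases List.mem_append.mp hv with hv | hv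
    · exact ih v hv
    · exact ((pvMem_F_succ graph nodes s k v).1 hv).1

lemma pvLevel_bound (graph : List (List Int)) (nodes : List Int) (s : Int) (hs : s ∈ nodes)
    (hn : nodes.Nodup) (k : Nat) (h : pvF graph nodes s k ≠ []) : k + 1 ≤ nodes.length := by
  have hlen : ∀ k, pvF graph nodes s k ≠ [] → k + 1 ≤ (pvV graph nodes s k).length := by
    intro k
    induction k with
    | zero => intro _; simp [pvV_zero]
    | succ k ih =>
      intro hne
      have hk : pvF graph nodes s k ≠ [] := by
        intro h0
        exact hne ((pvF_stab graph nodes s k h0 1).1)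
      have h1 : (pvF graph nodes s (k + 1)).length ≠ 0 := by
        intro h0
        exact hne (List.length_eq_zero_iff.mp h0)
      have h2 := ih hk
      rw [pvV_succ, List.length_append]
      omega
  have h3 := hlen k h
  have h4 : (pvV graph nodes s k).length ≤ nodes.length :=
    (List.subperm_of_subset (pvV_nodup graph nodes s hn k)
      (fun {v} hv => pvV_subset_nodes graph nodes s hs k v hv)).length_le
  omega

lemma pvF_big_empty (graph : List (List Int)) (nodes : List Int) (s : Int) (hs : s ∈ nodes)
    (hn : nodes.Nodup) (k : Nat) (hk : nodes.length ≤ k) : pvF graph nodes s k = [] := by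
  by_contra hne
  have := pvLevel_bound graph nodes s hs hn k hne
  omega

lemma pvFind_range {p : Nat → Bool} {m k : Nat} :
    (List.range m).find? p = some k ↔ k < m ∧ p k = true ∧ ∀ j < k, p j = false := by
  induction m generalizing k with
  | zero => simp
  | succ m ih =>
    rw [List.range_succ, List.find?_append]
    rcases ho : (List.range m).find? p with _ | k'
    · have hall := List.find?_eq_none.mp ho
      simp only [Option.none_or]
      constructor
      · intro h
        have h1 : p m = true ∧ k = m := by
          rcases hpm : p m with _ | _ <;> simp [List.find?, hpm] at h <;> simp_all
        refine ⟨by omega, h1.2 ▸ h1.1, ?_⟩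
        intro j hj
        have : j ∈ List.range m := List.mem_range.mpr (by omega)
        simpa using hall j this
      · rintro ⟨hk, hpk, hmin⟩
        have hkm : k = m := by
          by_contra hne
          have : k ∈ List.range m := List.mem_range.mpr (by omega)
          exact (hall k this) hpk
        subst hkm
        simp [List.find?, hpk]
    · have := ih.mp ho
      simp only [Option.some_or]
      constructor
      · intro h
        have hk : k' = k := by injection h
        subst hk
        exact ⟨by omega, this.2.1, this.2.2⟩
      · rintro ⟨hk, hpk, hmin⟩
        have : k' = k := by
          obtain ⟨hk'm, hpk', hmin'⟩ := this
          by_contra hne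
          rcases Nat.lt_or_ge k' k with hlt | hge
          · rw [hmin k' hlt] at hpk'; exact Bool.noConfusion hpk'
          · have hkk : k < k' := by omega
            rw [hmin' k hkk] at hpk; exact Bool.noConfusion hpk
        rw [this]

lemma pvLvl?_mem_F (graph : List (List Int)) (nodes : List Int) (s : Int) (hs : s ∈ nodes)
    (hn : nodes.Nodup) {k : Nat} {t : Int} (h : t ∈ pvF graph nodes s k) :
    pvLvl? graph nodes s t = some k := by
  have hne : pvF graph nodes s k ≠ [] := fun h0 => by simp [h0] at h
  have hb := pvLevel_bound graph nodes s hs hn k hne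
  unfold pvLvl?
  rw [pvFind_range]
  refine ⟨by omega, by simpa using h, ?_⟩
  intro j hj
  have := pvF_disjoint graph nodes s hj _ h
  simpa using this

lemma pvLvl?_some (graph : List (List Int)) (nodes : List Int) (s : Int) {k : Nat} {t : Int}
    (h : pvLvl? graph nodes s t = some k) : t ∈ pvF graph nodes s k := by
  unfold pvLvl? at h
  have := (pvFind_range.mp h).2.1
  simpa using this

lemma pvEntry_self (graph : List (List Int)) (nodes : List Int) (s : Int) (hs : s ∈ nodes)
    (hn : nodes.Nodup) : pvEntry graph nodes s s = 1 := by
  have h0 : s ∈ pvF graph nodes s 0 := by simp [pvF_zero]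
  unfold pvEntry
  rw [pvLvl?_mem_F graph nodes s hs hn h0]
  simp

-- nodes facts
lemma pvNodes_nodup (graph : List (List Int)) : (pvNodes graph).Nodup := by
  exact ((PySem.List.sorted_perm _ _ _).nodup_iff).mpr (PySem.Set.nodup_ofList _)

lemma pvMem_nodes (graph : List (List Int)) (v : Int) :
    v ∈ pvNodes graph ↔ ∃ e ∈ graph, v ∈ e := by
  unfold pvNodes
  rw [(PySem.List.sorted_perm _ _ _).mem_iff, PySem.Set.mem_ofList, List.mem_flatMap]

lemma pvAdjA_mem (graph : List (List Int)) {u v : Int} (h : pvAdjA graph u v = true) :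
    u ∈ pvNodes graph ∧ v ∈ pvNodes graph := by
  have h' : [u, v] ∈ graph ∨ [v, u] ∈ graph := by simpa [pvAdjA] using h
  rcases h' with hm | hm
  · constructor <;> rw [pvMem_nodes] <;> exact ⟨[u, v], hm, by simp⟩
  · constructor <;> rw [pvMem_nodes] <;> exact ⟨[v, u], hm, by simp⟩

lemma pvCol_getElem (nodes : List Int) (hn : nodes.Nodup) (j : Nat) (hj : j < nodes.length) :
    pvCol nodes nodes[j] = j := by
  have hmem : nodes[j] ∈ nodes := List.getElem_mem hj
  rcases Option.isSome_iff_exists.mp ((PySem.List.index?_isSome_iff nodes _).mpr hmem)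
    with ⟨k, hk⟩
  obtain ⟨hlt, heq, -⟩ := PySem.List.getElem_of_index?_eq_some hk
  have : k = j := (List.Nodup.getElem_inj_iff hn).mp heq
  unfold pvCol
  rw [hk, this]
  rfl

lemma pvCol_mem (nodes : List Int) {t : Int} (ht : t ∈ nodes) :
    pvCol nodes t < nodes.length ∧ nodes[pvCol nodes t]? = some t := by
  rcases Option.isSome_iff_exists.mp ((PySem.List.index?_isSome_iff nodes _).mpr ht)
    with ⟨k, hk⟩
  obtain ⟨hlt, heq, -⟩ := PySem.List.getElem_of_index?_eq_some hk
  unfold pvCol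
  rw [hk]
  refine ⟨hlt, ?_⟩
  simp [List.getElem?_eq_getElem hlt, heq]

-- generic: a fold writing list elements at pairwise-distinct indices
lemma pvFoldlSet {β : Type} (xs : List β) (ix : β → Nat) (val : β → Int) :
    ∀ (r : List Int), (xs.map ix).Nodup → (∀ x ∈ xs, ix x < r.length) → ∀ (j : Nat),
    (xs.foldl (fun r x => r.set (ix x) (val x)) r)[j]? =
      match xs.find? (fun x => ix x == j) with
      | some x => some (val x)
      | none => r[j]? := by
  induction xs with
  | nil => intro r _ _ j; simp
  | cons x xs ih =>
    intro r hnd hlt j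
    simp only [List.foldl_cons, List.find?_cons]
    rcases hx : (ix x == j : Bool) with _ | _
    · have hne : ix x ≠ j := by simpa using hx
      rw [ih (r.set (ix x) (val x)) (List.Nodup.of_cons hnd)
        (fun y hy => by rw [List.length_set]; exact hlt y (List.mem_cons_of_mem _ hy)) j]
      cases hfind : xs.find? (fun y => ix y == j) with
      | some y => rfl
      | none => exact List.getElem?_set_ne hne
    · have hj : ix x = j := by simpa using hx
      have hnone : xs.find? (fun y => ix y == j) = none := by
        rw [List.find?_eq_none]
        intro y hy
        have : ix y ≠ j := by
          intro hyj
          exact (List.nodup_cons.mp hnd).1 (hj ▸ hyj ▸ List.mem_map_of_mem hy)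
        simpa using this
      rw [ih (r.set (ix x) (val x)) (List.Nodup.of_cons hnd)
        (fun y hy => by rw [List.length_set]; exact hlt y (List.mem_cons_of_mem _ hy)) j,
        hnone]
      have hltx : ix x < r.length := hlt x List.mem_cons_self
      rw [← hj]
      exact List.getElem?_set_self hltx

-- generic: a fold rewriting rows of a matrix at pairwise-distinct row indices
lemma pvFoldlSetRow {β : Type} (xs : List β) (ix : β → Nat) (g : β → List Int → List Int) :
    ∀ (m : List (List Int)), (xs.map ix).Nodup → (∀ x ∈ xs, ix x < m.length) → ∀ (j : Nat),
    (xs.foldl (fun m x => m.set (ix x) (g x (m.getD (ix x) []))) m)[j]? =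
      match xs.find? (fun x => ix x == j) with
      | some x => some (g x (m.getD j []))
      | none => m[j]? := by
  induction xs with
  | nil => intro m _ _ j; simp
  | cons x xs ih =>
    intro m hnd hlt j
    simp only [List.foldl_cons, List.find?_cons]
    rcases hx : (ix x == j : Bool) with _ | _
    · have hne : ix x ≠ j := by simpa using hx
      rw [ih (m.set (ix x) (g x (m.getD (ix x) []))) (List.Nodup.of_cons hnd)
        (fun y hy => by rw [List.length_set]; exact hlt y (List.mem_cons_of_mem _ hy)) j]
      cases hfind : xs.find? (fun y => ix y == j) with
      | some y =>
        have hgd : (m.set (ix x) (g x (m.getD (ix x) []))).getD j [] = m.getD j [] := by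
          simp [List.getD_eq_getElem?_getD, List.getElem?_set_ne hne]
        rw [hgd]
      | none => exact List.getElem?_set_ne hne
    · have hj : ix x = j := by simpa using hx
      have hnone : xs.find? (fun y => ix y == j) = none := by
        rw [List.find?_eq_none]
        intro y hy
        have : ix y ≠ j := by
          intro hyj
          exact (List.nodup_cons.mp hnd).1 (hj ▸ hyj ▸ List.mem_map_of_mem hy)
        simpa using this
      rw [ih (m.set (ix x) (g x (m.getD (ix x) []))) (List.Nodup.of_cons hnd)
        (fun y hy => by rw [List.length_set]; exact hlt y (List.mem_cons_of_mem _ hy)) j,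
        hnone]
      have hltx : ix x < m.length := hlt x List.mem_cons_self
      rw [← hj]
      exact List.getElem?_set_self hltx

lemma pvFoldlSetRow_length {β : Type} (xs : List β) (f : β → Nat) (g : β → List Int → List Int)
    (m : List (List Int)) :
    (xs.foldl (fun m x => m.set (f x) (g x (m.getD (f x) []))) m).length = m.length := by
  induction xs generalizing m with
  | nil => rfl
  | cons x xs ih =>
    simp only [List.foldl_cons]
    rw [ih, List.length_set]

-- ==== A side ====

-- the inner 'for neighbor in nodes' loop of A's bfs
lemma pvInner (graph : List (List Int)) (c : Int) (w : Int) :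
    ∀ (l : List Int), l.Nodup → ∀ (q : List Int) (d : PySem.Dict Int Int),
    (l.foldl (fun (st : List Int × PySem.Dict Int Int) neighbor =>
        if pvAdjA graph c neighbor then
          if st.2.contains neighbor then st
          else (st.1 ++ [neighbor], st.2.insert neighbor w)
        else st) (q, d))
      = ((q ++ l.filter (fun v => pvAdjA graph c v && !d.contains v)),
         (l.filter (fun v => pvAdjA graph c v && !d.contains v)).foldl
           (fun d v => d.insert v w) d) := by
  intro l
  induction l with
  | nil => intro _ q d; simp
  | cons x xs ih =>
    intro hl q d
    simp only [List.foldl_cons, List.filter_cons]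
    rcases hadj : pvAdjA graph c x with _ | _
    · simp only [Bool.false_and, Bool.false_eq_true, if_false]
      exact ih (List.Nodup.of_cons hl) q d
    · rcases hc : d.contains x with _ | _
      · have hfc : xs.filter (fun v => pvAdjA graph c v && !(d.insert x w).contains v)
            = xs.filter (fun v => pvAdjA graph c v && !d.contains v) := by
          apply List.filter_congr
          intro v hv
          have hvx : v ≠ x := fun h => (List.nodup_cons.mp hl).1 (h ▸ hv)
          have hbx : (v == x) = false := by simpa using hvx
          rw [PySem.Dict.contains_insert]
          simp [hbx]
        have hrec := ih (List.Nodup.of_cons hl) (q ++ [x]) (d.insert x w)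
        rw [hfc] at hrec
        simp [hrec]
      · simp only [Bool.not_true, Bool.and_false, Bool.false_eq_true, if_false, if_true]
        exact ih (List.Nodup.of_cons hl) q d

lemma pvInsertAll_get? (w : Int) :
    ∀ (news : List Int) (d : PySem.Dict Int Int) (x : Int),
    (news.foldl (fun d v => d.insert v w) d).get? x =
      if x ∈ news then some w else d.get? x := by
  intro news
  induction news with
  | nil => intro d x; simp
  | cons v rest ih =>
    intro d x
    simp only [List.foldl_cons]
    rw [ih]
    by_cases hx : x ∈ rest
    · simp [hx, List.mem_cons]
    · by_cases hxv : x = v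
      · subst hxv
        simp [hx, PySem.Dict.get?_insert_self]
      · simp [hx, hxv, PySem.Dict.get?_insert_of_ne d w hxv]

lemma pvInsertAll_keys (w : Int) :
    ∀ (news : List Int) (d : PySem.Dict Int Int),
    (∀ v ∈ news, d.contains v = false) → news.Nodup →
    (news.foldl (fun d v => d.insert v w) d).keys = d.keys ++ news := by
  intro news
  induction news with
  | nil => intro d _ _; simp
  | cons v rest ih =>
    intro d hfresh hnd
    simp only [List.foldl_cons]
    rw [ih (d.insert v w) ?_ (List.Nodup.of_cons hnd),
      PySem.Dict.keys_insert_of_not_contains d w (hfresh v List.mem_cons_self)]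
    · simp
    · intro y hy
      have hyv : y ≠ v := fun h => (List.nodup_cons.mp hnd).1 (h ▸ hy)
      rw [PySem.Dict.contains_insert]
      simp [hyv]
      exact hfresh y (List.mem_cons_of_mem _ hy)

-- at a stopped state (empty next frontier), the visited map is exactly the level function
lemma pvFinalGet (graph : List (List Int)) (nodes : List Int) (s : Int) (hs : s ∈ nodes)
    (hn : nodes.Nodup) (k : Nat) (hstop : pvF graph nodes s (k + 1) = []) (x : Int) :
    (if x ∈ pvV graph nodes s k then some (pvEntry graph nodes s x) else none)
      = (pvLvl? graph nodes s x).map (fun l => (l : Int) + 1) := by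
  by_cases hx : x ∈ pvV graph nodes s k
  · obtain ⟨j, hjk, hjF⟩ := (pvMem_V_iff graph nodes s k x).mp hx
    rw [if_pos hx]
    unfold pvEntry
    rw [pvLvl?_mem_F graph nodes s hs hn hjF]
    rfl
  · rw [if_neg hx]
    rcases hl : pvLvl? graph nodes s x with _ | l
    · rfl
    · exfalso
      have hmem := pvLvl?_some graph nodes s hl
      rcases Nat.lt_or_ge l (k + 1) with hlk | hlk
      · exact hx ((pvMem_V_iff graph nodes s k x).mpr ⟨l, by omega, hmem⟩)
      · obtain ⟨j, rfl⟩ : ∃ j, l = (k + 1) + j := ⟨l - (k + 1), by omega⟩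
        rw [(pvF_stab graph nodes s (k + 1) hstop j).1] at hmem
        exact List.not_mem_nil hmem

-- the main queue-BFS invariant lemma: A's while-loop computes exactly the level function
lemma pvBfsLoop_spec (graph : List (List Int)) (nodes : List Int) (s : Int)
    (hnodes : nodes = pvNodes graph) (hs : s ∈ nodes) :
    ∀ (fuel k : Nat) (R N : List Int) (d : PySem.Dict Int Int),
    (∀ v ∈ R, v ∈ pvF graph nodes s k) → R.Nodup →
    (∀ v, v ∈ N ↔ v ∉ pvV graph nodes s k ∧
      ∃ u ∈ pvF graph nodes s k, u ∉ R ∧ pvAdjA graph u v = true) → N.Nodup →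
    (∀ v, d.get? v = if v ∈ pvV graph nodes s k then some (pvEntry graph nodes s v)
      else if v ∈ N then some ((k : Int) + 2) else none) →
    d.keys.Nodup →
    R.length + N.length + (nodes.length - d.keys.length) < fuel →
    (∀ x, (pvBfsLoop graph nodes fuel (R ++ N) d).get? x =
      (pvLvl? graph nodes s x).map (fun l => (l : Int) + 1)) ∧
    (pvBfsLoop graph nodes fuel (R ++ N) d).keys.Nodup := by
  have hn : nodes.Nodup := hnodes ▸ pvNodes_nodup graph
  intro fuel
  induction fuel with
  | zero => intro k R N d _ _ _ _ _ _ hm; omega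
  | succ fuel ih =>
    intro k R N d hR hRnd hN hNnd hd hdk hm
    have hVsub : ∀ (k' : Nat), ∀ v ∈ pvV graph nodes s k', v ∈ nodes :=
      fun k' => pvV_subset_nodes graph nodes s hs k'
    -- one pop step (applies whenever the first queue segment is nonempty)
    have hpop : ∀ (k : Nat) (u : Int) (R' N : List Int) (d : PySem.Dict Int Int),
        (∀ v ∈ u :: R', v ∈ pvF graph nodes s k) → (u :: R').Nodup →
        (∀ v, v ∈ N ↔ v ∉ pvV graph nodes s k ∧
          ∃ u' ∈ pvF graph nodes s k, u' ∉ u :: R' ∧ pvAdjA graph u' v = true) → N.Nodup →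
        (∀ v, d.get? v = if v ∈ pvV graph nodes s k then some (pvEntry graph nodes s v)
          else if v ∈ N then some ((k : Int) + 2) else none) →
        d.keys.Nodup →
        (u :: R').length + N.length + (nodes.length - d.keys.length) < fuel + 1 →
        (∀ x, (pvBfsLoop graph nodes (fuel + 1) ((u :: R') ++ N) d).get? x =
          (pvLvl? graph nodes s x).map (fun l => (l : Int) + 1)) ∧
        (pvBfsLoop graph nodes (fuel + 1) ((u :: R') ++ N) d).keys.Nodup := by
      clear hR hRnd hN hNnd hd hdk hm R N d k
      intro k u R' N d hR hRnd hN hNnd hd hdk hm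
      have huF : u ∈ pvF graph nodes s k := hR u List.mem_cons_self
      have huV : u ∈ pvV graph nodes s k := pvF_subset_V graph nodes s k u huF
      have hulvl : pvLvl? graph nodes s u = some k := pvLvl?_mem_F graph nodes s hs hn huF
      have hcd : d.getD u 0 = (k : Int) + 1 := by
        unfold PySem.Dict.getD
        rw [hd u, if_pos huV]
        unfold pvEntry
        rw [hulvl]
        rfl
      -- unfold one iteration of the loop and normalize the inner fold via pvInner
      have hstep : pvBfsLoop graph nodes (fuel + 1) ((u :: R') ++ N) d =
          pvBfsLoop graph nodes fuel
            ((R' ++ N) ++ (nodes.filter (fun v => pvAdjA graph u v && !d.contains v)))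
            ((nodes.filter (fun v => pvAdjA graph u v && !d.contains v)).foldl
              (fun d v => d.insert v ((k : Int) + 2)) d) := by
        have hunf : pvBfsLoop graph nodes (fuel + 1) ((u :: R') ++ N) d =
            pvBfsLoop graph nodes fuel
              (nodes.foldl (fun (st : List Int × PySem.Dict Int Int) neighbor =>
                if pvAdjA graph u neighbor then
                  if st.2.contains neighbor then st
                  else (st.1 ++ [neighbor], st.2.insert neighbor (d.getD u 0 + 1))
                else st) (R' ++ N, d)).1
              (nodes.foldl (fun (st : List Int × PySem.Dict Int Int) neighbor =>
                if pvAdjA graph u neighbor then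
                  if st.2.contains neighbor then st
                  else (st.1 ++ [neighbor], st.2.insert neighbor (d.getD u 0 + 1))
                else st) (R' ++ N, d)).2 := rfl
        rw [hunf, pvInner graph u (d.getD u 0 + 1) nodes hn (R' ++ N) d, hcd,
          show ((k : Int) + 1 + 1) = (k : Int) + 2 from by ring, List.append_assoc]
      rw [hstep]
      set news := nodes.filter (fun v => pvAdjA graph u v && !d.contains v) with hnews
      -- facts about news
      have hnews_mem : ∀ v, v ∈ news ↔
          v ∈ nodes ∧ pvAdjA graph u v = true ∧ d.contains v = false := by
        intro v
        rw [hnews, List.mem_filter]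
        simp
      have hcontV : ∀ v, v ∈ pvV graph nodes s k → d.contains v = true := by
        intro v hv
        rw [PySem.Dict.contains_eq_isSome_get?, hd v, if_pos hv]
        rfl
      have hcontN : ∀ v, v ∈ N → d.contains v = true := by
        intro v hv
        have hnv : v ∉ pvV graph nodes s k := ((hN v).mp hv).1
        rw [PySem.Dict.contains_eq_isSome_get?, hd v, if_neg hnv, if_pos hv]
        rfl
      have hnews_notV : ∀ v ∈ news, v ∉ pvV graph nodes s k := by
        intro v hv hvV
        have := (hnews_mem v).mp hv
        rw [hcontV v hvV] at this
        exact Bool.noConfusion this.2.2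
      have hnews_notN : ∀ v ∈ news, v ∉ N := by
        intro v hv hvN
        have := (hnews_mem v).mp hv
        rw [hcontN v hvN] at this
        exact Bool.noConfusion this.2.2
      have hnews_nd : news.Nodup := hn.filter _
      -- the new second segment
      have hN' : ∀ v, v ∈ N ++ news ↔ v ∉ pvV graph nodes s k ∧
          ∃ u' ∈ pvF graph nodes s k, u' ∉ R' ∧ pvAdjA graph u' v = true := by
        intro v
        rw [List.mem_append]
        constructor
        · rintro (hv | hv)
          · obtain ⟨hnv, u', hu'F, hu'R, hadj⟩ := (hN v).mp hv
            exact ⟨hnv, u', hu'F, fun h => hu'R (List.mem_cons_of_mem _ h), hadj⟩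
          · obtain ⟨hvn, hadj, hcont⟩ := (hnews_mem v).mp hv
            refine ⟨hnews_notV v hv, u, huF, ?_, hadj⟩
            exact (List.nodup_cons.mp hRnd).1
        · rintro ⟨hnv, u', hu'F, hu'R', hadj⟩
          by_cases huu : u' = u
          · subst huu
            by_cases hvN : v ∈ N
            · exact Or.inl hvN
            · refine Or.inr ((hnews_mem v).mpr ⟨?_, hadj, ?_⟩)
              · exact hnodes ▸ (pvAdjA_mem graph hadj).2
              · rw [PySem.Dict.contains_eq_isSome_get?, hd v, if_neg hnv, if_neg hvN]
                rfl
          · refine Or.inl ((hN v).mpr ⟨hnv, u', hu'F, ?_, hadj⟩)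
            intro h
            rcases List.mem_cons.mp h with h | h
            · exact huu h
            · exact hu'R' h
      have hN'nd : (N ++ news).Nodup := by
        refine List.nodup_append.mpr ⟨hNnd, hnews_nd, ?_⟩
        intro a ha b hb hab
        exact hnews_notN b hb (hab ▸ ha)
      -- the new dictionary
      have hd' : ∀ v, ((news.foldl (fun d v => d.insert v ((k : Int) + 2)) d)).get? v =
          if v ∈ pvV graph nodes s k then some (pvEntry graph nodes s v)
          else if v ∈ N ++ news then some ((k : Int) + 2) else none := by
        intro v
        rw [pvInsertAll_get?]
        by_cases hv : v ∈ news
        · rw [if_pos hv, if_neg (hnews_notV v hv), if_pos (List.mem_append_right _ hv)]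
        · rw [if_neg hv, hd v]
          by_cases hvV : v ∈ pvV graph nodes s k
          · rw [if_pos hvV, if_pos hvV]
          · rw [if_neg hvV, if_neg hvV]
            by_cases hvN : v ∈ N
            · rw [if_pos hvN, if_pos (List.mem_append_left _ hvN)]
            · rw [if_neg hvN, if_neg (fun h => (List.mem_append.mp h).elim hvN hv)]
      have hfresh : ∀ v ∈ news, d.contains v = false := fun v hv => ((hnews_mem v).mp hv).2.2
      have hkeys' : ((news.foldl (fun d v => d.insert v ((k : Int) + 2)) d)).keys
          = d.keys ++ news := pvInsertAll_keys _ news d hfresh hnews_nd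
      have hdk' : ((news.foldl (fun d v => d.insert v ((k : Int) + 2)) d)).keys.Nodup := by
        rw [hkeys']
        refine List.nodup_append.mpr ⟨hdk, hnews_nd, ?_⟩
        intro a ha b hb hab
        subst hab
        have : d.contains a = true := (PySem.Dict.contains_iff_mem_keys d a).mpr ha
        rw [hfresh a hb] at this
        exact Bool.noConfusion this
      -- keys stay inside nodes, giving the measure bound
      have hkeys_sub : ∀ v ∈ d.keys ++ news, v ∈ nodes := by
        intro v hv
        rcases List.mem_append.mp hv with hv | hv
        · have hc : d.contains v = true := (PySem.Dict.contains_iff_mem_keys d v).mpr hv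
          rw [PySem.Dict.contains_eq_isSome_get?, hd v] at hc
          by_cases hvV : v ∈ pvV graph nodes s k
          · exact hVsub k v hvV
          · rw [if_neg hvV] at hc
            by_cases hvN : v ∈ N
            · obtain ⟨-, u', -, -, hadj⟩ := (hN v).mp hvN
              exact hnodes ▸ (pvAdjA_mem graph hadj).2
            · rw [if_neg hvN] at hc
              exact Bool.noConfusion hc
        · exact ((hnews_mem v).mp hv).1
      have hnodupkeys : (d.keys ++ news).Nodup := by
        refine List.nodup_append.mpr ⟨hdk, hnews_nd, ?_⟩
        intro a ha b hb hab
        subst hab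
        have : d.contains a = true := (PySem.Dict.contains_iff_mem_keys d a).mpr ha
        rw [hfresh a hb] at this
        exact Bool.noConfusion this
      have hklen : d.keys.length + news.length ≤ nodes.length := by
        have := (List.subperm_of_subset hnodupkeys
          (fun {v} hv => hkeys_sub v hv)).length_le
        rw [List.length_append] at this
        exact this
      have hm' : R'.length + (N ++ news).length +
          (nodes.length - ((news.foldl (fun d v => d.insert v ((k : Int) + 2)) d)).keys.length)
          < fuel := by
        rw [hkeys', List.length_append, List.length_append]
        simp only [List.length_cons] at hm
        omega
      have := ih k R' (N ++ news) _ (fun v hv => hR v (List.mem_cons_of_mem _ hv))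
        (List.Nodup.of_cons hRnd) hN' hN'nd hd' hdk' hm'
      rwa [← List.append_assoc] at this
    -- dispatch on the queue shape
    rcases R with _ | ⟨u, R'⟩
    · rcases N with _ | ⟨w, N'⟩
      · -- queue empty: the loop returns d, which is the level function
        have hstop : pvF graph nodes s (k + 1) = [] := by
          rw [List.eq_nil_iff_forall_not_mem]
          intro v hv
          obtain ⟨hvn, hnv, u', hu'F, hadj⟩ := (pvMem_F_succ graph nodes s k v).1 hv
          exact List.not_mem_nil ((hN v).mpr ⟨hnv, u', hu'F, List.not_mem_nil, hadj⟩)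
        constructor
        · intro x
          show d.get? x = _
          rw [hd x]
          have hxN : (x ∈ ([] : List Int)) = False := by simp
          rw [← pvFinalGet graph nodes s hs hn k hstop x]
          by_cases hx : x ∈ pvV graph nodes s k
          · rw [if_pos hx, if_pos hx]
          · rw [if_neg hx, if_neg hx, if_neg List.not_mem_nil]
        · exact hdk
      · -- first segment exhausted: re-view the state one level deeper and pop
        have hNF : ∀ v, v ∈ w :: N' ↔ v ∈ pvF graph nodes s (k + 1) := by
          intro v
          rw [pvMem_F_succ]
          constructor
          · intro hv
            obtain ⟨hnv, u', hu'F, -, hadj⟩ := (hN v).mp hv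
            exact ⟨hnodes ▸ (pvAdjA_mem graph hadj).2, hnv, u', hu'F, hadj⟩
          · rintro ⟨hvn, hnv, u', hu'F, hadj⟩
            exact (hN v).mpr ⟨hnv, u', hu'F, List.not_mem_nil, hadj⟩
        have hR2 : ∀ v ∈ w :: N', v ∈ pvF graph nodes s (k + 1) :=
          fun v hv => (hNF v).mp hv
        have hN2 : ∀ v, v ∈ ([] : List Int) ↔ v ∉ pvV graph nodes s (k + 1) ∧
            ∃ u' ∈ pvF graph nodes s (k + 1), u' ∉ w :: N' ∧ pvAdjA graph u' v = true := by
          intro v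
          simp only [List.not_mem_nil, false_iff]
          rintro ⟨-, u', hu'F, hu'N, -⟩
          exact hu'N ((hNF u').mpr hu'F)
        have hd2 : ∀ v, d.get? v =
            if v ∈ pvV graph nodes s (k + 1) then some (pvEntry graph nodes s v)
            else if v ∈ ([] : List Int) then some (((k + 1 : Nat) : Int) + 2) else none := by
          intro v
          rw [hd v]
          by_cases hvV : v ∈ pvV graph nodes s k
          · rw [if_pos hvV,
              if_pos (pvV_mono graph nodes s (Nat.le_succ k) v hvV)]
          · rw [if_neg hvV]
            by_cases hvN : v ∈ w :: N'
            · have hvF : v ∈ pvF graph nodes s (k + 1) := (hNF v).mp hvN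
              rw [if_pos hvN, if_pos (pvF_subset_V graph nodes s (k + 1) v hvF)]
              unfold pvEntry
              rw [pvLvl?_mem_F graph nodes s hs hn hvF]
              push_cast
              ring_nf
            · rw [if_neg hvN, if_neg ?_, if_neg List.not_mem_nil]
              rw [pvV_succ, List.mem_append]
              rintro (h | h)
              · exact hvV h
              · exact hvN ((hNF v).mpr h)
        have hm2 : (w :: N').length + ([] : List Int).length +
            (nodes.length - d.keys.length) < fuel + 1 := by
          simp only [List.length_cons, List.length_nil] at *
          omega
        have := hpop (k + 1) w N' [] d hR2 hNnd hN2 List.nodup_nil hd2 hdk hm2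
        rwa [List.append_nil] at this
    · exact hpop k u R' N d hR hRnd hN hNnd hd hdk hm

-- ==== B side ====

lemma pvGetD_insert (d : PySem.Dict Int (PySem.Set Int)) (k : Int) (val : PySem.Set Int)
    (u : Int) : (d.insert k val).getD u PySem.Set.empty
      = if u = k then val else d.getD u PySem.Set.empty := by
  unfold PySem.Dict.getD
  by_cases h : u = k
  · subst h
    rw [if_pos rfl, PySem.Dict.get?_insert_self]
    rfl
  · rw [if_neg h, PySem.Dict.get?_insert_of_ne d val h]

lemma pvAdjB_base (nodes : List Int) :
    ∀ u, (nodes.foldl (fun (d : PySem.Dict Int (PySem.Set Int)) u =>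
        d.insert u PySem.Set.empty) PySem.Dict.empty).getD u
      PySem.Set.empty = PySem.Set.empty := by
  suffices h : ∀ (l : List Int) (d : PySem.Dict Int (PySem.Set Int)),
      (∀ u, d.getD u PySem.Set.empty = PySem.Set.empty) →
      ∀ u, (l.foldl (fun (d : PySem.Dict Int (PySem.Set Int)) u =>
          d.insert u PySem.Set.empty) d).getD u PySem.Set.empty
        = PySem.Set.empty by
    exact h nodes PySem.Dict.empty (fun u => by
      unfold PySem.Dict.getD
      rw [PySem.Dict.get?_empty]
      rfl)
  intro l
  induction l with
  | nil => intro d hd u; exact hd u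
  | cons x xs ih =>
    intro d hd u
    simp only [List.foldl_cons]
    refine ih _ (fun u' => ?_) u
    rw [pvGetD_insert]
    by_cases h : u' = x
    · rw [if_pos h]
    · rw [if_neg h]; exact hd u'

lemma pvAdjFold : ∀ (gs : List (List Int)) (d : PySem.Dict Int (PySem.Set Int)),
    (∀ u, (d.getD u PySem.Set.empty).Nodup) →
    (∀ u v, (v ∈ (gs.foldl (fun d e =>
      match e with
      | [u, v] => (d.modify u PySem.Set.empty (fun s => PySem.Set.add s v)).modify v
          PySem.Set.empty (fun s => PySem.Set.add s u)
      | _ => d) d).getD u PySem.Set.empty ↔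
        (v ∈ d.getD u PySem.Set.empty ∨ gs.contains [u, v] = true ∨ gs.contains [v, u] = true)))
    ∧ (∀ u, ((gs.foldl (fun d e =>
      match e with
      | [u, v] => (d.modify u PySem.Set.empty (fun s => PySem.Set.add s v)).modify v
          PySem.Set.empty (fun s => PySem.Set.add s u)
      | _ => d) d).getD u PySem.Set.empty).Nodup) := by
  intro gs
  induction gs with
  | nil =>
    intro d hd
    refine ⟨fun u v => ?_, fun u => hd u⟩
    simp
  | cons e gs ih =>
    intro d hd
    have hcons : ∀ (x : List Int) (h : List Int) (t : List (List Int)),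
        (h :: t).contains x = (x == h || t.contains x) := by
      intro x h t
      simp [beq_eq_decide]
    rcases e with _ | ⟨a, e⟩
    · simp only [List.foldl_cons]
      obtain ⟨h1, h2⟩ := ih d hd
      refine ⟨fun u v => ?_, h2⟩
      rw [h1 u v, hcons, hcons]
      simp
    rcases e with _ | ⟨b, e⟩
    · simp only [List.foldl_cons]
      obtain ⟨h1, h2⟩ := ih d hd
      refine ⟨fun u v => ?_, h2⟩
      rw [h1 u v, hcons, hcons]
      simp
    rcases e with _ | ⟨c, e⟩
    · -- a two-element edge [a, b]
      simp only [List.foldl_cons]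
      set d1 := d.modify a PySem.Set.empty (fun s => PySem.Set.add s b) with hd1
      set d2 := d1.modify b PySem.Set.empty (fun s => PySem.Set.add s a) with hd2
      have hmem1 : ∀ u v, v ∈ d1.getD u PySem.Set.empty ↔
          (v ∈ d.getD u PySem.Set.empty ∨ (u = a ∧ v = b)) := by
        intro u v
        rw [hd1]
        unfold PySem.Dict.modify
        rw [pvGetD_insert]
        by_cases h : u = a
        · subst h
          rw [if_pos rfl, PySem.Set.mem_add]
          tauto
        · rw [if_neg h]
          tauto
      have hnd1 : ∀ u, (d1.getD u PySem.Set.empty).Nodup := by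
        intro u
        rw [hd1]
        unfold PySem.Dict.modify
        rw [pvGetD_insert]
        by_cases h : u = a
        · rw [if_pos h]; exact PySem.Set.nodup_add _ _ (hd a)
        · rw [if_neg h]; exact hd u
      have hmem2 : ∀ u v, v ∈ d2.getD u PySem.Set.empty ↔
          (v ∈ d.getD u PySem.Set.empty ∨ (u = a ∧ v = b) ∨ (u = b ∧ v = a)) := by
        intro u v
        rw [hd2]
        unfold PySem.Dict.modify
        rw [pvGetD_insert]
        by_cases h : u = b
        · subst h
          rw [if_pos rfl, PySem.Set.mem_add, hmem1]
          tauto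
        · rw [if_neg h, hmem1]
          tauto
      have hnd2 : ∀ u, (d2.getD u PySem.Set.empty).Nodup := by
        intro u
        rw [hd2]
        unfold PySem.Dict.modify
        rw [pvGetD_insert]
        by_cases h : u = b
        · rw [if_pos h]; exact PySem.Set.nodup_add _ _ (hnd1 b)
        · rw [if_neg h]; exact hnd1 u
      obtain ⟨h1, h2⟩ := ih d2 hnd2
      refine ⟨fun u v => ?_, h2⟩
      rw [h1 u v, hmem2 u v, hcons, hcons]
      have e1 : (([u, v] : List Int) == [a, b]) = (decide (u = a) && decide (v = b)) := by
        simp [beq_eq_decide]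
      have e2 : (([v, u] : List Int) == [a, b]) = (decide (v = a) && decide (u = b)) := by
        simp [beq_eq_decide]
      rw [e1, e2]
      simp only [Bool.or_eq_true, Bool.and_eq_true, decide_eq_true_eq]
      tauto
    · -- length ≥ 3
      simp only [List.foldl_cons]
      obtain ⟨h1, h2⟩ := ih d hd
      refine ⟨fun u v => ?_, h2⟩
      rw [h1 u v, hcons, hcons]
      simp

lemma pvAdjB_mem (graph : List (List Int)) (nodes : List Int) (u v : Int) :
    v ∈ (pvAdjB graph nodes).getD u PySem.Set.empty ↔ pvAdjA graph u v = true := by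
  unfold pvAdjB
  have hbase := pvAdjB_base nodes
  have hnd : ∀ u, ((nodes.foldl (fun (d : PySem.Dict Int (PySem.Set Int)) u =>
      d.insert u PySem.Set.empty) PySem.Dict.empty).getD u PySem.Set.empty).Nodup := by
    intro u
    rw [hbase u]
    exact List.nodup_nil
  obtain ⟨h1, -⟩ := pvAdjFold graph _ hnd
  rw [h1 u v, hbase u]
  unfold pvAdjA
  simp

lemma pvZipIdx_find : ∀ (l : List Int), l.Nodup → ∀ (off j : Nat) (hj : j < l.length),
    (l.zipIdx off).find? (fun p => p.1 == l[j]) = some (l[j], j + off) := by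
  intro l
  induction l with
  | nil => intro _ off j hj; simp at hj
  | cons x xs ih =>
    intro hl off j hj
    rw [List.zipIdx_cons, List.find?_cons]
    cases j with
    | zero => simp
    | succ j =>
      have hj' : j < xs.length := by simpa using hj
      have hmem : xs[j] ∈ xs := List.getElem_mem hj'
      have hne : (x == (x :: xs)[j + 1]) = false := by
        have : x ≠ xs[j] := fun h => (List.nodup_cons.mp hl).1 (h ▸ hmem)
        simpa using this
      rw [hne]
      have := ih (List.Nodup.of_cons hl) (off + 1) j hj'
      simp only [List.getElem_cons_succ]
      rw [this]
      have harith : j + (off + 1) = j + 1 + off := by omega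
      rw [harith]

lemma pvIdx_getD (nodes : List Int) (hn : nodes.Nodup) (j : Nat) (hj : j < nodes.length) :
    (pvIdx nodes).getD nodes[j] 0 = j := by
  have hfresh : ∀ p ∈ nodes.zipIdx, (PySem.Dict.empty : PySem.Dict Int Nat).contains p.1
      = false := fun p _ => PySem.Dict.contains_empty p.1
  have hkeysnd : (nodes.zipIdx.map (fun (p : Int × Nat) => p.1)).Nodup := by
    have : (nodes.zipIdx.map (fun (p : Int × Nat) => p.1)) = nodes := by
      simp
    rw [this]
    exact hn
  have hitems : (pvIdx nodes).items
      = nodes.zipIdx.map (fun (p : Int × Nat) => (p.1, p.2)) := by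
    unfold pvIdx
    rw [PySem.Dict.items_foldl_insert_fresh nodes.zipIdx (fun p => p.1) (fun p => p.2)
      PySem.Dict.empty hfresh hkeysnd]
    rfl
  have hget : (pvIdx nodes).get? nodes[j] = some (nodes[j], j).2 := by
    show ((pvIdx nodes).items.find? (fun p => p.1 == nodes[j])).map (fun p => p.2) = _
    rw [hitems]
    have : nodes.zipIdx.map (fun (p : Int × Nat) => (p.1, p.2)) = nodes.zipIdx := by
      simp
    rw [this, pvZipIdx_find nodes hn 0 j hj]
    rfl
  unfold PySem.Dict.getD
  rw [hget]
  rfl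

lemma pvIdx_getD_mem (nodes : List Int) (hn : nodes.Nodup) {u : Int} (hu : u ∈ nodes) :
    (pvIdx nodes).getD u 0 = pvCol nodes u := by
  obtain ⟨j, hj, rfl⟩ := List.mem_iff_getElem.mp hu
  rw [pvIdx_getD nodes hn j hj, pvCol_getElem nodes hn j hj]

lemma pvFoldlSet_length {β : Type} (xs : List β) (ix : β → Nat) (val : β → Int) :
    ∀ (r : List Int), (xs.foldl (fun r x => r.set (ix x) (val x)) r).length = r.length := by
  induction xs with
  | nil => intro r; rfl
  | cons x xs ih =>
    intro r
    simp only [List.foldl_cons]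
    rw [ih, List.length_set]

-- once the frontier is empty, the row is exactly the entry row
lemma pvRowDone (graph : List (List Int)) (nodes : List Int) (s : Int) (hs : s ∈ nodes)
    (hn : nodes.Nodup) (t : Nat) (hFt : pvF graph nodes s t = []) (row : List Int)
    (hlen : row.length = nodes.length)
    (hrow : ∀ (j : Nat) (hj : j < nodes.length), row[j]? = some
      (match pvLvl? graph nodes s nodes[j] with
       | some l => if l < t then (l : Int) + 1 else 0
       | none => 0)) :
    row = nodes.map (fun v => pvEntry graph nodes s v) := by
  apply List.ext_getElem?
  intro j
  by_cases hj : j < nodes.length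
  · rw [hrow j hj, List.getElem?_map, List.getElem?_eq_getElem hj]
    simp only [Option.map_some]
    unfold pvEntry
    rcases hl : pvLvl? graph nodes s nodes[j] with _ | l
    · rfl
    · have hmem := pvLvl?_some graph nodes s hl
      have hlt : l < t := by
        by_contra hge
        obtain ⟨i, rfl⟩ : ∃ i, l = t + i := ⟨l - t, by omega⟩
        rw [(pvF_stab graph nodes s t hFt i).1] at hmem
        exact List.not_mem_nil hmem
      simp [hlt]
  · rw [List.getElem?_eq_none (by omega : row.length ≤ j),
      List.getElem?_eq_none (by simpa using (by omega : nodes.length ≤ j))]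

-- the level-synchronous loop of B computes exactly the level function
lemma pvLevelLoop_spec (graph : List (List Int)) (nodes : List Int) (s : Int)
    (hnodes : nodes = pvNodes graph) (hs : s ∈ nodes) :
    ∀ (fuel t : Nat) (row : List Int) (vis fr : PySem.Set Int),
    row.length = nodes.length →
    (∀ v, v ∈ vis ↔ v ∈ pvV graph nodes s t) → vis.Nodup →
    (∀ v, v ∈ fr ↔ v ∈ pvF graph nodes s t) → fr.Nodup →
    (∀ (j : Nat) (hj : j < nodes.length), row[j]? = some
      (match pvLvl? graph nodes s nodes[j] with
       | some l => if l < t then (l : Int) + 1 else 0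
       | none => 0)) →
    nodes.length + 1 ≤ fuel + t →
    pvLevelLoop (pvAdjB graph nodes) (pvIdx nodes) fuel row vis fr ((t : Int) + 1) =
      nodes.map (fun v => pvEntry graph nodes s v) := by
  have hn : nodes.Nodup := hnodes ▸ pvNodes_nodup graph
  intro fuel
  induction fuel with
  | zero =>
    intro t row vis fr hlen hvis hvisnd hfr hfrnd hrow hfuel
    have hFt : pvF graph nodes s t = [] := pvF_big_empty graph nodes s hs hn t (by omega)
    show row = _
    exact pvRowDone graph nodes s hs hn t hFt row hlen hrow
  | succ fuel ih =>
    intro t row vis fr hlen hvis hvisnd hfr hfrnd hrow hfuel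
    cases fr with
    | nil =>
      have hFt : pvF graph nodes s t = [] := by
        rw [List.eq_nil_iff_forall_not_mem]
        intro v hv
        exact List.not_mem_nil ((hfr v).mpr hv)
      show row = _
      exact pvRowDone graph nodes s hs hn t hFt row hlen hrow
    | cons f0 fr' =>
      have hFne : pvF graph nodes s t ≠ [] := by
        intro h0
        have := (hfr f0).mp List.mem_cons_self
        rw [h0] at this
        exact List.not_mem_nil this
      have hbound := pvLevel_bound graph nodes s hs hn t hFne
      have hfr_nodes : ∀ u ∈ f0 :: fr', u ∈ nodes := by
        intro u hu
        exact pvV_subset_nodes graph nodes s hs t u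
          (pvF_subset_V graph nodes s t u ((hfr u).mp hu))
      have hunf : pvLevelLoop (pvAdjB graph nodes) (pvIdx nodes) (fuel + 1) row vis
          (f0 :: fr') ((t : Int) + 1)
          = pvLevelLoop (pvAdjB graph nodes) (pvIdx nodes) fuel
            ((f0 :: fr').foldl
              (fun r u => r.set ((pvIdx nodes).getD u 0) ((t : Int) + 1)) row)
            (PySem.Set.union vis (PySem.Set.diff (PySem.Set.ofList ((f0 :: fr').flatMap
              (fun u => (pvAdjB graph nodes).getD u PySem.Set.empty))) vis))
            (PySem.Set.diff (PySem.Set.ofList ((f0 :: fr').flatMap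
              (fun u => (pvAdjB graph nodes).getD u PySem.Set.empty))) vis)
            (((t : Int) + 1) + 1) := rfl
      rw [hunf]
      set FR := f0 :: fr' with hFR
      set newF := PySem.Set.diff (PySem.Set.ofList (FR.flatMap
        (fun u => (pvAdjB graph nodes).getD u PySem.Set.empty))) vis with hnewF
      -- the new frontier is exactly the next level set
      have hnewF_mem : ∀ v, v ∈ newF ↔ v ∈ pvF graph nodes s (t + 1) := by
        intro v
        rw [hnewF, PySem.Set.mem_diff, PySem.Set.mem_ofList, List.mem_flatMap,
          pvMem_F_succ]
        constructor
        · rintro ⟨⟨u, hu, hv⟩, hnv⟩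
          have hadj := (pvAdjB_mem graph nodes u v).mp hv
          exact ⟨hnodes ▸ (pvAdjA_mem graph hadj).2, fun h => hnv ((hvis v).mpr h),
            u, (hfr u).mp hu, hadj⟩
        · rintro ⟨hvn, hnv, u, huF, hadj⟩
          exact ⟨⟨u, (hfr u).mpr huF, (pvAdjB_mem graph nodes u v).mpr hadj⟩,
            fun h => hnv ((hvis v).mp h)⟩
      have hnewF_nd : newF.Nodup := PySem.Set.nodup_diff _ _ (PySem.Set.nodup_ofList _)
      have hvis' : ∀ v, v ∈ PySem.Set.union vis newF ↔ v ∈ pvV graph nodes s (t + 1) := by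
        intro v
        rw [PySem.Set.mem_union, pvV_succ, List.mem_append, hvis v, hnewF_mem v]
      have hvis'_nd : (PySem.Set.union vis newF).Nodup := PySem.Set.nodup_union _ _ hvisnd
      -- the written row
      have hrow' : ∀ (j : Nat) (hj : j < nodes.length),
          (FR.foldl (fun r u => r.set ((pvIdx nodes).getD u 0) ((t : Int) + 1)) row)[j]?
          = some (match pvLvl? graph nodes s nodes[j] with
            | some l => if l < t + 1 then (l : Int) + 1 else 0
            | none => 0) := by
        intro j hj
        have hmapeq : FR.map (fun u => (pvIdx nodes).getD u 0) = FR.map (pvCol nodes) :=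
          List.map_congr_left (fun u hu => pvIdx_getD_mem nodes hn (hfr_nodes u hu))
        have hmnd : (FR.map (fun u => (pvIdx nodes).getD u 0)).Nodup := by
          rw [hmapeq]
          refine List.Nodup.map_on ?_ hfrnd
          intro a ha b hb hab
          have h1 := (pvCol_mem nodes (hfr_nodes a ha)).2
          have h2 := (pvCol_mem nodes (hfr_nodes b hb)).2
          rw [hab, h2] at h1
          exact Option.some.inj h1.symm
        have hlt : ∀ u ∈ FR, (pvIdx nodes).getD u 0 < row.length := by
          intro u hu
          rw [pvIdx_getD_mem nodes hn (hfr_nodes u hu), hlen]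
          exact (pvCol_mem nodes (hfr_nodes u hu)).1
        rw [pvFoldlSet FR (fun u => (pvIdx nodes).getD u 0) (fun _ => (t : Int) + 1)
          row hmnd hlt j]
        by_cases hjF : nodes[j] ∈ FR
        · have hfind : FR.find? (fun u => (pvIdx nodes).getD u 0 == j) ≠ none := by
            intro h0
            have := List.find?_eq_none.mp h0 nodes[j] hjF
            rw [pvIdx_getD_mem nodes hn (hfr_nodes _ hjF), pvCol_getElem nodes hn j hj]
              at this
            simp at this
          rcases hf : FR.find? (fun u => (pvIdx nodes).getD u 0 == j) with _ | u
          · exact absurd hf hfind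
          · have hu : u ∈ FR := List.mem_of_find?_eq_some hf
            have hp := List.find?_some hf
            rw [pvIdx_getD_mem nodes hn (hfr_nodes u hu)] at hp
            have hcu : pvCol nodes u = j := by simpa using hp
            have hueq : u = nodes[j] := by
              have h1 := (pvCol_mem nodes (hfr_nodes u hu)).2
              rw [hcu, List.getElem?_eq_getElem hj] at h1
              exact (Option.some.inj h1).symm
            have hlvl : pvLvl? graph nodes s nodes[j] = some t :=
              pvLvl?_mem_F graph nodes s hs hn ((hfr nodes[j]).mp (hueq ▸ hu))
            rw [hlvl]
            simp
        · have hfind : FR.find? (fun u => (pvIdx nodes).getD u 0 == j) = none := by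
            rw [List.find?_eq_none]
            intro u hu
            rw [pvIdx_getD_mem nodes hn (hfr_nodes u hu)]
            intro hp
            have hcu : pvCol nodes u = j := by simpa using hp
            have h1 := (pvCol_mem nodes (hfr_nodes u hu)).2
            rw [hcu, List.getElem?_eq_getElem hj] at h1
            exact hjF ((Option.some.inj h1) ▸ hu)
          rw [hfind, hrow j hj]
          rcases hl : pvLvl? graph nodes s nodes[j] with _ | l
          · rfl
          · have hne : l ≠ t := by
              intro h0
              exact hjF ((hfr nodes[j]).mpr (h0 ▸ pvLvl?_some graph nodes s hl))
            by_cases hlt2 : l < t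
            · simp only []
              rw [if_pos hlt2, if_pos (by omega)]
            · simp only []
              rw [if_neg hlt2, if_neg (by omega)]
      have hlen' : (FR.foldl (fun r u => r.set ((pvIdx nodes).getD u 0) ((t : Int) + 1))
          row).length = nodes.length := by
        rw [pvFoldlSet_length FR (fun u => (pvIdx nodes).getD u 0) (fun _ => (t : Int) + 1)
          row, hlen]
      have hcast : ((t : Int) + 1) + 1 = (((t + 1 : Nat)) : Int) + 1 := by push_cast; ring
      rw [hcast]
      exact ih (t + 1) _ _ _ hlen' hvis' hvis'_nd hnewF_mem hnewF_nd hrow' (by omega)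

-- ==== assembly ====

lemma pvFind?_congr {α : Type} (l : List α) (p q : α → Bool) (h : ∀ x ∈ l, p x = q x) :
    l.find? p = l.find? q := by
  induction l with
  | nil => rfl
  | cons x xs ih =>
    rw [List.find?_cons, List.find?_cons, h x List.mem_cons_self]
    cases q x
    · exact ih (fun y hy => h y (List.mem_cons_of_mem _ hy))
    · rfl

lemma pvSet2D_collapse (cf : Int → Nat) (i : Nat) :
    ∀ (ps : List (Int × Int)) (m : List (List Int)),
    ps.foldl (fun m p => pvSet2D m i (cf p.1) p.2) m
      = m.set i (ps.foldl (fun r p => r.set (cf p.1) p.2) (m.getD i [])) := by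
  intro ps
  induction ps with
  | nil =>
    intro m
    simp only [List.foldl_nil]
    apply List.ext_getElem?
    intro j
    rw [List.getElem?_set]
    by_cases hij : i = j
    · subst hij
      by_cases hlen : i < m.length
      · rw [if_pos rfl, if_pos hlen, List.getD_eq_getElem?_getD,
          List.getElem?_eq_getElem hlen]
        rfl
      · rw [if_pos rfl, if_neg hlen, List.getElem?_eq_none (by omega)]
    · rw [if_neg hij]
  | cons p ps ih =>
    intro m
    simp only [List.foldl_cons]
    show ps.foldl (fun m p => pvSet2D m i (cf p.1) p.2)
        (m.set i ((m.getD i []).set (cf p.1) p.2)) = _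
    rw [ih (m.set i ((m.getD i []).set (cf p.1) p.2)), List.set_set]
    congr 1
    by_cases hlen : i < m.length
    · rw [List.getD_eq_getElem?_getD, List.getElem?_set_self hlen, Option.getD_some]
    · have h1 : m.set i ((m.getD i []).set (cf p.1) p.2) = m :=
        List.set_eq_of_length_le (by omega)
      have h2 : m.getD i [] = [] := by
        rw [List.getD_eq_getElem?_getD, List.getElem?_eq_none (by omega)]
        rfl
      rw [h1, h2]
      rfl

-- one call of bfs(s): it rewrites exactly row nodes.index(s) with the level row of s
lemma pvBfsA_eq (graph : List (List Int)) (s : Int) (hs : s ∈ pvNodes graph)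
    (m : List (List Int)) (hmlen : m.length = (pvNodes graph).length)
    (hrow : m[pvCol (pvNodes graph) s]? =
      some ((List.replicate (pvNodes graph).length (0 : Int)).set
        (pvCol (pvNodes graph) s) 1)) :
    pvBfsA graph (pvNodes graph) m s
      = m.set (pvCol (pvNodes graph) s)
          ((pvNodes graph).map (fun t => pvEntry graph (pvNodes graph) s t)) := by
  have hn : (pvNodes graph).Nodup := pvNodes_nodup graph
  have hnpos : 0 < (pvNodes graph).length := List.length_pos_of_mem hs
  -- the visited dict of this bfs call
  have hd0 : ∀ v, (PySem.Dict.empty.insert s (1 : Int)).get? v =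
      if v ∈ pvV graph (pvNodes graph) s 0 then some (pvEntry graph (pvNodes graph) s v)
      else if v ∈ ([] : List Int) then some ((0 : Int) + 2) else none := by
    intro v
    rw [pvV_zero]
    by_cases hv : v = s
    · subst hv
      rw [PySem.Dict.get?_insert_self, if_pos (List.mem_singleton.mpr rfl),
        pvEntry_self graph (pvNodes graph) v hs hn]
    · rw [PySem.Dict.get?_insert_of_ne _ _ hv, PySem.Dict.get?_empty,
        if_neg (fun h => hv (List.mem_singleton.mp h)), if_neg List.not_mem_nil]
  have hdk0 : (PySem.Dict.empty.insert s (1 : Int)).keys.Nodup := by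
    rw [PySem.Dict.keys_insert_of_not_contains _ _ (PySem.Dict.contains_empty s),
      PySem.Dict.keys_empty]
    simp
  have hkeys0 : (PySem.Dict.empty.insert s (1 : Int)).keys.length = 1 := by
    rw [PySem.Dict.keys_insert_of_not_contains _ _ (PySem.Dict.contains_empty s),
      PySem.Dict.keys_empty]
    rfl
  obtain ⟨hget, hkeysnd⟩ := pvBfsLoop_spec graph (pvNodes graph) s rfl hs
    ((pvNodes graph).length + 1) 0 [s] [] (PySem.Dict.empty.insert s 1)
    (fun v hv => by rw [pvF_zero]; exact hv)
    (by simp)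
    (fun v => by
      simp only [List.not_mem_nil, false_iff]
      rintro ⟨-, u, huF, huR, -⟩
      rw [pvF_zero] at huF
      exact huR huF)
    List.nodup_nil hd0 hdk0
    (by rw [hkeys0]; simp only [List.length_cons, List.length_nil]; omega)
  rw [List.append_nil] at hget hkeysnd
  set visited := pvBfsLoop graph (pvNodes graph) ((pvNodes graph).length + 1) [s]
    (PySem.Dict.empty.insert s 1) with hvisited
  -- every key of visited is a node
  have hitems_nodes : ∀ p ∈ visited.items, p.1 ∈ pvNodes graph := by
    intro p hp
    have hc : visited.contains p.1 = true :=
      (PySem.Dict.contains_iff_mem_keys visited p.1).mpr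
        (PySem.Dict.mem_keys_of_mem_items visited hp)
    rw [PySem.Dict.contains_eq_isSome_get?, hget p.1] at hc
    rcases hl : pvLvl? graph (pvNodes graph) s p.1 with _ | l
    · rw [hl] at hc; exact Bool.noConfusion hc
    · exact pvV_subset_nodes graph (pvNodes graph) s hs l p.1
        (pvF_subset_V graph (pvNodes graph) s l p.1 (pvLvl?_some graph (pvNodes graph) s hl))
  show visited.items.foldl
    (fun m p => pvSet2D m (pvCol (pvNodes graph) s) (pvCol (pvNodes graph) p.1) p.2) m = _
  rw [pvSet2D_collapse (pvCol (pvNodes graph)) (pvCol (pvNodes graph) s) visited.items m]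
  have hbase : m.getD (pvCol (pvNodes graph) s) [] =
      (List.replicate (pvNodes graph).length (0 : Int)).set (pvCol (pvNodes graph) s) 1 := by
    rw [List.getD_eq_getElem?_getD, hrow]
    rfl
  rw [hbase]
  congr 1
  set rowbase := (List.replicate (pvNodes graph).length (0 : Int)).set
    (pvCol (pvNodes graph) s) 1 with hrowbase
  have hrblen : rowbase.length = (pvNodes graph).length := by
    rw [hrowbase, List.length_set, List.length_replicate]
  have hmapnd : (visited.items.map (fun p => pvCol (pvNodes graph) p.1)).Nodup := by
    have h1 : (visited.items.map (fun p => pvCol (pvNodes graph) p.1))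
        = (visited.items.map (fun (p : Int × Int) => p.1)).map (pvCol (pvNodes graph)) := by
      rw [List.map_map]
      rfl
    rw [h1]
    refine List.Nodup.map_on ?_ hkeysnd
    intro a ha b hb hab
    have ha' : a ∈ pvNodes graph := by
      obtain ⟨p, hp, rfl⟩ := List.mem_map.mp ha
      exact hitems_nodes p hp
    have hb' : b ∈ pvNodes graph := by
      obtain ⟨p, hp, rfl⟩ := List.mem_map.mp hb
      exact hitems_nodes p hp
    have h2 := (pvCol_mem (pvNodes graph) ha').2
    rw [hab, (pvCol_mem (pvNodes graph) hb').2] at h2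
    exact (Option.some.inj h2).symm
  have hltall : ∀ p ∈ visited.items, pvCol (pvNodes graph) p.1 < rowbase.length := by
    intro p hp
    rw [hrblen]
    exact (pvCol_mem (pvNodes graph) (hitems_nodes p hp)).1
  apply List.ext_getElem?
  intro j
  by_cases hj : j < (pvNodes graph).length
  · rw [pvFoldlSet visited.items (fun p => pvCol (pvNodes graph) p.1) (fun p => p.2)
      rowbase hmapnd hltall j]
    have hfc : visited.items.find? (fun p => pvCol (pvNodes graph) p.1 == j)
        = visited.items.find? (fun p => p.1 == (pvNodes graph)[j]) := by
      apply pvFind?_congr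
      intro p hp
      have hp1 : p.1 ∈ pvNodes graph := hitems_nodes p hp
      have hiff : (pvCol (pvNodes graph) p.1 = j) ↔ (p.1 = (pvNodes graph)[j]) := by
        constructor
        · intro h
          have h2 := (pvCol_mem (pvNodes graph) hp1).2
          rw [h, List.getElem?_eq_getElem hj] at h2
          exact (Option.some.inj h2).symm
        · intro h
          rw [h]
          exact pvCol_getElem (pvNodes graph) hn j hj
      rw [beq_eq_decide, beq_eq_decide]
      exact decide_eq_decide.mpr hiff
    rw [hfc]
    have hgd : visited.get? (pvNodes graph)[j]
        = (visited.items.find? (fun p => p.1 == (pvNodes graph)[j])).map (fun p => p.2) := rfl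
    rw [List.getElem?_map, List.getElem?_eq_getElem hj]
    simp only [Option.map_some]
    rcases hf : visited.items.find? (fun p => p.1 == (pvNodes graph)[j]) with _ | p
    · -- not visited: entry is 0, and the base row holds 0 here
      rw [hf]
      show rowbase[j]? = _
      have hnone : visited.get? (pvNodes graph)[j] = none := by rw [hgd, hf]; rfl
      rw [hget (pvNodes graph)[j]] at hnone
      rcases hl : pvLvl? graph (pvNodes graph) s (pvNodes graph)[j] with _ | l
      · have hcolne : pvCol (pvNodes graph) s ≠ j := by
          intro h
          have h2 := (pvCol_mem (pvNodes graph) hs).2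
          rw [h, List.getElem?_eq_getElem hj] at h2
          have hsj : s = (pvNodes graph)[j] := (Option.some.inj h2).symm
          have h0 : s ∈ pvF graph (pvNodes graph) s 0 := by rw [pvF_zero]; simp
          rw [← hsj, pvLvl?_mem_F graph (pvNodes graph) s hs hn h0] at hl
          simp at hl
        rw [hrowbase, List.getElem?_set, if_neg hcolne, List.getElem?_replicate, if_pos hj]
        unfold pvEntry
        rw [hl]
      · rw [hl] at hnone
        simp at hnone
    · rw [hf]
      show some p.2 = _
      have hsome : visited.get? (pvNodes graph)[j] = some p.2 := by rw [hgd, hf]; rfl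
      rw [hget (pvNodes graph)[j]] at hsome
      rcases hl : pvLvl? graph (pvNodes graph) s (pvNodes graph)[j] with _ | l
      · rw [hl] at hsome; simp at hsome
      · rw [hl] at hsome
        have hp2 : p.2 = (l : Int) + 1 := by
          have := Option.some.inj hsome
          exact this.symm
        rw [hp2]
        unfold pvEntry
        rw [hl]

  · rw [List.getElem?_eq_none, List.getElem?_eq_none]
    · simpa using (by omega : (pvNodes graph).length ≤ j)
    · rw [pvFoldlSet_length, hrblen]
      omega

-- the outer 'for node in nodes' loop fills each row once, with its BFS row
lemma pvOuter (graph : List (List Int)) :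
    ∀ (suf : List Int) (m : List (List Int)),
    m.length = (pvNodes graph).length → suf.Nodup →
    (∀ t ∈ suf, t ∈ pvNodes graph) →
    (∀ t ∈ suf, m[pvCol (pvNodes graph) t]? =
      some ((List.replicate (pvNodes graph).length (0 : Int)).set
        (pvCol (pvNodes graph) t) 1)) →
    (suf.foldl (fun m node => pvBfsA graph (pvNodes graph) m node) m).length = m.length ∧
    ∀ (j : Nat) (hj : j < (pvNodes graph).length),
      (suf.foldl (fun m node => pvBfsA graph (pvNodes graph) m node) m)[j]? =
        (if (pvNodes graph)[j] ∈ suf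
         then some ((pvNodes graph).map
           (fun t => pvEntry graph (pvNodes graph) (pvNodes graph)[j] t))
         else m[j]?) := by
  have hn : (pvNodes graph).Nodup := pvNodes_nodup graph
  intro suf
  induction suf with
  | nil =>
    intro m hmlen _ _ _
    refine ⟨rfl, fun j hj => ?_⟩
    rw [if_neg List.not_mem_nil]
    simp only [List.foldl_nil]
  | cons s suf' ih =>
    intro m hmlen hnd hsub hrows
    have hs : s ∈ pvNodes graph := hsub s List.mem_cons_self
    have hstep := pvBfsA_eq graph s hs m hmlen (hrows s List.mem_cons_self)
    simp only [List.foldl_cons]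
    rw [hstep]
    set m' := m.set (pvCol (pvNodes graph) s)
      ((pvNodes graph).map (fun t => pvEntry graph (pvNodes graph) s t)) with hm'
    have hcolne : ∀ t ∈ suf', pvCol (pvNodes graph) t ≠ pvCol (pvNodes graph) s := by
      intro t ht heq
      have h1 := (pvCol_mem (pvNodes graph) (hsub t (List.mem_cons_of_mem _ ht))).2
      rw [heq, (pvCol_mem (pvNodes graph) hs).2] at h1
      exact (List.nodup_cons.mp hnd).1 ((Option.some.inj h1) ▸ ht)
    obtain ⟨hlen', hj'⟩ := ih m' (by rw [hm', List.length_set]; exact hmlen)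
      (List.Nodup.of_cons hnd) (fun t ht => hsub t (List.mem_cons_of_mem _ ht))
      (fun t ht => by
        rw [hm', List.getElem?_set_ne (fun h => hcolne t ht h.symm)]
        exact hrows t (List.mem_cons_of_mem _ ht))
    refine ⟨by rw [hlen', hm', List.length_set], fun j hj => ?_⟩
    rw [hj' j hj]
    by_cases h1 : (pvNodes graph)[j] ∈ suf'
    · rw [if_pos h1, if_pos (List.mem_cons_of_mem _ h1)]
    · rw [if_neg h1]
      by_cases h2 : (pvNodes graph)[j] = s
      · rw [if_pos (List.mem_cons.mpr (Or.inl h2))]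
        have hcol : pvCol (pvNodes graph) s = j := by
          rw [← h2, pvCol_getElem (pvNodes graph) hn j hj]
        rw [hm', List.getElem?_set, if_pos hcol,
          if_pos (by rw [hcol, hmlen]; exact hj), h2]
      · rw [if_neg (fun h => (List.mem_cons.mp h).elim h2 h1), hm',
          List.getElem?_set_ne (fun h => h2 ?_)]
        have h3 := (pvCol_mem (pvNodes graph) hs).2
        rw [h, List.getElem?_eq_getElem hj] at h3
        exact Option.some.inj h3

lemma pvA_spec (start end_ : Int) (graph : List (List Int)) :
    search_connection start end_ graph = pvSpecMatrix graph := by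
  have hn : (pvNodes graph).Nodup := pvNodes_nodup graph
  set n := (pvNodes graph).length with hnn
  show (pvNodes graph).foldl (fun m node => pvBfsA graph (pvNodes graph) m node)
      ((List.range n).foldl (fun m i => pvSet2D m i i 1)
        (List.replicate n (List.replicate n (0 : Int)))) = pvSpecMatrix graph
  have hde : (List.range n).foldl (fun m i => pvSet2D m i i 1)
        (List.replicate n (List.replicate n (0 : Int)))
      = (List.range n).foldl (fun m i => m.set i ((m.getD i []).set i 1))
        (List.replicate n (List.replicate n (0 : Int))) := rfl
  have hdlen : ((List.range n).foldl (fun m i => pvSet2D m i i 1)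
      (List.replicate n (List.replicate n (0 : Int)))).length = n := by
    rw [hde, pvFoldlSetRow_length (List.range n) (fun i => i) (fun i r => r.set i 1),
      List.length_replicate]
  have hdiag : ∀ (j : Nat), j < n →
      ((List.range n).foldl (fun m i => pvSet2D m i i 1)
        (List.replicate n (List.replicate n (0 : Int))))[j]?
      = some ((List.replicate n (0 : Int)).set j 1) := by
    intro j hj
    rw [hde, pvFoldlSetRow (List.range n) (fun i => i) (fun i r => r.set i 1)
      (List.replicate n (List.replicate n (0 : Int)))
      (by simpa using List.nodup_range)
      (fun i hi => by rw [List.length_replicate]; exact List.mem_range.mp hi) j]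
    have hfind : (List.range n).find? (fun i => i == j) = some j :=
      pvFind_range.mpr ⟨hj, by simp, fun i hij => by
        simpa using Nat.ne_of_lt hij⟩
    rw [hfind]
    rw [List.getD_eq_getElem?_getD, List.getElem?_replicate, if_pos hj]
    rfl
  obtain ⟨hflen, hfj⟩ := pvOuter graph (pvNodes graph)
    ((List.range n).foldl (fun m i => pvSet2D m i i 1)
      (List.replicate n (List.replicate n (0 : Int))))
    hdlen hn (fun t ht => ht)
    (fun t ht => hdiag (pvCol (pvNodes graph) t) (pvCol_mem (pvNodes graph) ht).1)
  apply List.ext_getElem?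
  intro j
  by_cases hj : j < n
  · rw [hfj j hj, if_pos (List.getElem_mem hj)]
    unfold pvSpecMatrix
    rw [List.getElem?_map, List.getElem?_eq_getElem hj]
    rfl
  · rw [List.getElem?_eq_none (by rw [hflen, hdlen]; omega)]
    unfold pvSpecMatrix
    rw [List.getElem?_eq_none (by rw [List.length_map]; omega)]

lemma pvB_spec (start end_ : Int) (graph : List (List Int)) :
    search_connection_alt start end_ graph = pvSpecMatrix graph := by
  have hn : (pvNodes graph).Nodup := pvNodes_nodup graph
  show (pvNodes graph).foldl (fun res s => res ++ [pvLevelLoop (pvAdjB graph (pvNodes graph))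
      (pvIdx (pvNodes graph)) ((pvNodes graph).length + 1)
      (List.replicate (pvNodes graph).length 0)
      (PySem.Set.add PySem.Set.empty s) (PySem.Set.add PySem.Set.empty s) 1]) []
    = pvSpecMatrix graph
  rw [PySem.List.foldl_append_singleton_eq_map]
  unfold pvSpecMatrix
  rw [List.nil_append]
  apply List.map_congr_left
  intro s hs
  have hrow0 : ∀ (j : Nat) (hj : j < (pvNodes graph).length),
      (List.replicate (pvNodes graph).length (0 : Int))[j]? = some
        (match pvLvl? graph (pvNodes graph) s (pvNodes graph)[j] with
         | some l => if l < 0 then (l : Int) + 1 else 0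
         | none => 0) := by
    intro j hj
    rw [List.getElem?_replicate, if_pos hj]
    rcases pvLvl? graph (pvNodes graph) s (pvNodes graph)[j] with _ | l <;> simp
  have hmain := pvLevelLoop_spec graph (pvNodes graph) s rfl hs
    ((pvNodes graph).length + 1) 0 (List.replicate (pvNodes graph).length 0) [s] [s]
    (by simp) (fun v => Iff.rfl) (by simp) (fun v => Iff.rfl) (by simp) hrow0 (by omega)
  have hone : (((0 : Nat) : Int) + 1) = 1 := by norm_num
  rw [hone] at hmain
  exact hmain

-- ===== VERDICT (by name: the statement is the Claim_ definition above) =====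
theorem search_connection_spec : Claim_equal_search_connection := by
  intro start end_ graph _
  unfold Spec_search_connection
  rw [pvA_spec, pvB_spec]
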